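-- pv_equiv track=rewrite | github.com/Firelord2345/Python- | nsgt_problem.py | remove_nsgt_once
-- ===== SOURCE A (Python) =====
-- def remove_nsgt_once(word):
--     # Define the sequence of characters to remove
--     to_remove = ['n', 's', 'g', 't']
--
--     # Convert the word to a list for easier manipulation
--     word_list = list(word)
--
--     # Initialize a flag to track which characters to remove
--     remove_index = 0
--
--     # Iterate over the list and remove the characters in the sequence once
--     for i in range(len(word_list)):
--         if word_list[i] == to_remove[remove_index]:
--             word_list[i] = ''  # Remove the character
--             remove_index += 1  # Move to the next character in 'n', 's', 'g', 't'
--             if remove_index == len(to_remove):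
--                 break  # Stop once all characters are removed
--
--     # Join the list back to a string
--     return ''.join(word_list)
-- ===== SOURCE B (Python) =====
-- def remove_nsgt_once(word):
--     # Per-target forward search: for each of 'n','s','g','t' in order, find its
--     # first occurrence in the remaining tail, keep the prefix before it, and
--     # continue on the tail after it; stop at the first target not found.
--     chars = list(word)
--     kept = []
--     for t in ['n', 's', 'g', 't']:
--         if t in chars:
--             i = chars.index(t)
--             kept += chars[:i]
--             chars = chars[i + 1:]
--         else:
--             break
--     return ''.join(kept + chars)
-- ===== Notes on version B (the rewrite author's own statement) =====
-- stated objective: alternative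
-- what changed: A makes one pass over the characters carrying a pointer into the target sequence and blanking matched slots; B instead runs a per-target forward search (membership test + list.index + slicing) over the remaining tail for each of the four targets and concatenates the kept pieces.
import Mathlib
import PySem

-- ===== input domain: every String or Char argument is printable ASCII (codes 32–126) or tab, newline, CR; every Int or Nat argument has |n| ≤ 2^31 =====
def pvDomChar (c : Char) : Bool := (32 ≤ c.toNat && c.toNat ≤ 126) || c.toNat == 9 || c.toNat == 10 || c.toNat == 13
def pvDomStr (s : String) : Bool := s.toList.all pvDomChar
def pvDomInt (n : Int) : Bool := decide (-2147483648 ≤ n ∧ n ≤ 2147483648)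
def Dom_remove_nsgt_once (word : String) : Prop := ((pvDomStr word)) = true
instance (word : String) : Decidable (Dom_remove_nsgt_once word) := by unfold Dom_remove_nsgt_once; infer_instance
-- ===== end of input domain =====

-- B replaces A's single stateful pass by a per-target forward search; objective: alternative structure, same cost.

-- ===== PORT A =====
-- the sequence of characters to remove
def pvTargets : List Char := ['n', 's', 'g', 't']

-- A's loop: i ranges over word_list; remove_index advances on a match; break at 4 leaves the rest untouched.
-- word_list elements are Python strings ('' after removal), so the state is a List String.
def goA (cs : List Char) (ri : Nat) : List String :=
  match cs with
  | [] => []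
  | c :: rest =>
    if ri = 4 then (c :: rest).map (fun d => String.ofList [d])   -- loop was broken: remaining slots unchanged
    else if c = pvTargets.getD ri ' ' then "" :: goA rest (ri + 1)
    else String.ofList [c] :: goA rest ri

def remove_nsgt_once (word : String) : String :=
  PySem.Str.join "" (goA word.toList 0)

-- ===== PORT B =====
-- Source B's loop over the four targets: find the first occurrence in the remaining tail,
-- keep the slice before it, recurse on the slice after it; stop when a target is absent.
def goB (ts : List Char) (kept : List Char) (cs : List Char) : List Char :=
  match ts with
  | [] => kept ++ cs
  | t :: rest =>
    match PySem.List.index? cs t with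
    | some i => goB rest (kept ++ cs.take i) (cs.drop (i + 1))
    | none => kept ++ cs

def remove_nsgt_once_alt (word : String) : String :=
  String.ofList (goB ['n', 's', 'g', 't'] [] word.toList)

-- ===== PRECONDITION & SPEC =====
def Spec_remove_nsgt_once (word : String) (out : String) : Prop := out = remove_nsgt_once_alt word
instance (word : String) (out : String) : Decidable (Spec_remove_nsgt_once word out) := by unfold Spec_remove_nsgt_once; infer_instance

-- ===== CLAIM (what is proved, stated in full; the proofs are below) =====
def Claim_equal_remove_nsgt_once : Prop := ∀ (word : String), Dom_remove_nsgt_once word → Spec_remove_nsgt_once word (remove_nsgt_once word)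

-- ===== LEMMAS AND PROOFS =====

-- Common specification: remove the subsequence ts from cs greedily, left to right.
def subRem : List Char → List Char → List Char
  | cs, [] => cs
  | [], _ :: _ => []
  | c :: cs, t :: ts => if c = t then subRem cs ts else c :: subRem cs (t :: ts)

@[simp] theorem subRem_nil (ts : List Char) : subRem [] ts = [] := by
  cases ts <;> rfl

theorem join_nil_cons (p : List Char) (ps : List (List Char)) :
    PySem.Chars.join [] (p :: ps) = p ++ PySem.Chars.join [] ps := by
  cases ps with
  | nil => simp [PySem.Chars.join_singleton, PySem.Chars.join_nil]
  | cons q qs => simp [PySem.Chars.join_cons_cons]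

@[simp] theorem subRem_nil_right (cs : List Char) : subRem cs [] = cs := by
  cases cs <;> rfl

theorem chars_goA (cs : List Char) (ri : Nat) (h : ri ≤ 4) :
    PySem.Chars.join [] ((goA cs ri).map String.toList) = subRem cs (pvTargets.drop ri) := by
  induction cs generalizing ri with
  | nil => simp [goA, PySem.Chars.join_nil]
  | cons c rest ih =>
    by_cases h4 : ri = 4
    · subst h4
      simp only [goA, reduceIte, pvTargets, List.drop, List.map_map, subRem_nil_right]
      have hcomp : (String.toList ∘ fun d : Char => String.ofList [d]) = fun d => [d] := by
        funext d; simp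
      rw [hcomp]
      exact PySem.Chars.join_nil_singletons (c :: rest)
    · interval_cases ri <;>
        · simp only [goA, pvTargets, List.getD, List.drop, subRem, reduceIte, List.getElem?_cons_zero,
            List.getElem?_cons_succ, Option.getD_some]
          by_cases hc : c = 'n' <;> by_cases hs : c = 's' <;> by_cases hg : c = 'g' <;> by_cases ht : c = 't' <;>
            simp_all [join_nil_cons, pvTargets, List.drop]

theorem goA_eq_subRem (cs : List Char) (ri : Nat) (h : ri ≤ 4) :
    PySem.Str.join "" (goA cs ri) = String.ofList (subRem cs (pvTargets.drop ri)) := by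
  have h1 : (PySem.Str.join "" (goA cs ri)).toList = subRem cs (pvTargets.drop ri) := by
    rw [PySem.Str.toList_join]
    simpa using chars_goA cs ri h
  rw [← h1, String.ofList_toList]

theorem subRem_not_mem (cs : List Char) (t : Char) (ts : List Char) (h : t ∉ cs) :
    subRem cs (t :: ts) = cs := by
  induction cs with
  | nil => simp
  | cons c rest ih =>
    simp only [List.mem_cons, not_or] at h
    simp [subRem, Ne.symm h.1, ih h.2]

theorem subRem_split (pre suf : List Char) (t : Char) (ts : List Char) (h : t ∉ pre) :
    subRem (pre ++ t :: suf) (t :: ts) = pre ++ subRem suf ts := by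
  induction pre with
  | nil => simp [subRem]
  | cons p rest ih =>
    simp only [List.mem_cons, not_or] at h
    simp [subRem, Ne.symm h.1, ih h.2]

theorem goB_eq_subRem (ts kept cs : List Char) :
    goB ts kept cs = kept ++ subRem cs ts := by
  induction ts generalizing kept cs with
  | nil => simp [goB]
  | cons t rest ih =>
    cases hidx : PySem.List.index? cs t with
    | none =>
      have hmem := (PySem.List.index?_eq_none_iff cs t).mp hidx
      simp only [goB, hidx, subRem_not_mem cs t rest hmem]
    | some i =>
      obtain ⟨pre, suf, rfl, hlen, hmem⟩ := (PySem.List.index?_eq_some_iff cs t i).mp hidx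
      subst hlen
      have htake : List.take pre.length (pre ++ t :: suf) = pre := by simp
      have hdrop : List.drop (pre.length + 1) (pre ++ t :: suf) = suf := by
        rw [show pre.length + 1 = (pre ++ [t]).length by simp,
            show pre ++ t :: suf = (pre ++ [t]) ++ suf by simp, List.drop_left]
      simp only [goB, hidx, htake, hdrop, ih, subRem_split pre suf t rest hmem, List.append_assoc]

-- ===== VERDICT (by name: the statement is the Claim_ definition above) =====
theorem remove_nsgt_once_spec : Claim_equal_remove_nsgt_once := by
  intro word _
  unfold Spec_remove_nsgt_once remove_nsgt_once remove_nsgt_once_alt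
  rw [goA_eq_subRem word.toList 0 (by omega), goB_eq_subRem]
  rfl
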